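-- pv_equiv track=rewrite | github.com/skjerns/NT1-HRV | preparation/2_match_patients.py | create_list_possible_matches
-- ===== SOURCE A (Python) =====
-- def create_list_possible_matches(patients, controls, agediff=3):
--     possible = {p:[] for p in patients}
--     for p, p_age in patients.items():
--         for c, c_age in controls.items():
--             if abs(p_age-c_age)<=agediff:
--                 possible[p].append(c)
--     possible = {p:possible[p] for p in possible if not len(possible[p])==0}
--     return possible
-- ===== SOURCE B (Python) =====
-- def create_list_possible_matches(patients, controls, agediff=3):
--     # Sort controls by age once; answer each DISTINCT patient age once, by binary
--     # search for the left edge of its age window plus a scan to the right edge,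
--     # re-sorting the matched controls by original position; memoize rows per age.
--     ctrl = sorted([(age, i, name) for i, (name, age) in enumerate(controls.items())],
--                   key=lambda t: t[0])
--     ages = [t[0] for t in ctrl]
--     result = {}
--     cache = {}
--     for p, p_age in patients.items():
--         if p_age in cache:
--             names = cache[p_age]
--         else:
--             target = p_age - agediff
--             lo, hi = 0, len(ctrl)
--             while lo < hi:
--                 mid = (lo + hi) // 2
--                 if ages[mid] < target:
--                     lo = mid + 1
--                 else:
--                     hi = mid
--             upper = p_age + agediff
--             matches = []
--             j = lo
--             while j < len(ctrl) and ages[j] <= upper: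
--                 matches.append((ctrl[j][1], ctrl[j][2]))
--                 j += 1
--             matches.sort(key=lambda t: t[0])
--             names = [name for _, name in matches]
--             cache[p_age] = names
--         if names:
--             result[p] = names
--     return result
-- ===== Notes on version B (the rewrite author's own statement) =====
-- stated objective: faster
-- what changed: A scans every control for every patient; B sorts the controls by age once, answers each distinct patient age by binary-searching the left edge of its age window and scanning only the window (matched controls re-sorted by original position), and memoizes the resulting row per patient age.
import Mathlib
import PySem

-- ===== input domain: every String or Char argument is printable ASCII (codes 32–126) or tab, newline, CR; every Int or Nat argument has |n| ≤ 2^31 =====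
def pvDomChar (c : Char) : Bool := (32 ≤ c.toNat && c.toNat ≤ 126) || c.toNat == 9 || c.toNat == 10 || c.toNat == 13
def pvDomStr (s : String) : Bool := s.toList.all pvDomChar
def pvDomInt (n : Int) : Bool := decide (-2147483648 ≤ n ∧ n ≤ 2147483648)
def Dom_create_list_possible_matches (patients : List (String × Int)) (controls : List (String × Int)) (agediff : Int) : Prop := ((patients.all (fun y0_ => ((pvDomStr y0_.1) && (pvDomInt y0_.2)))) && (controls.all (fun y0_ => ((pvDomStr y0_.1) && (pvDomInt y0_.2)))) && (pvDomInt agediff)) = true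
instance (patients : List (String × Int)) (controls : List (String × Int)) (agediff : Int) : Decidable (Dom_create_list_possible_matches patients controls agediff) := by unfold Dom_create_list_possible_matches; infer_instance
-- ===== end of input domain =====

-- B replaces A's patient×control double scan by sorting the controls by age once and
-- answering each patient from a binary-searched age window (matches re-sorted by
-- original position); return-value equivalence, neither program mutates its arguments.
-- Both dict parameters arrive as association lists; both ports first collapse them with
-- PySem.Dict.ofList, exactly as Python's dict construction does before either body runs.

-- ===== PORT A =====
def create_list_possible_matches (patients : List (String × Int)) (controls : List (String × Int)) (agediff : Int) : List (String × List String) :=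
  let pd := (PySem.Dict.ofList patients).items   -- the dict argument's items, in dict order
  let cd := (PySem.Dict.ofList controls).items
  -- possible = {p: [] for p in patients}
  let possible : PySem.Dict String (List String) :=
    pd.foldl (fun d pp => d.insert pp.1 ([] : List String)) PySem.Dict.empty
  -- for p, p_age in patients.items(): for c, c_age in controls.items(): if abs(..)<=agediff: possible[p].append(c)
  let possible : PySem.Dict String (List String) :=
    pd.foldl (fun d pp =>
      cd.foldl (fun d cc =>
        if |pp.2 - cc.2| ≤ agediff then d.modify pp.1 [] (fun l => l ++ [cc.1]) else d) d) possible
  -- possible = {p: possible[p] for p in possible if not len(possible[p])==0}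
  -- (p ranges over possible's keys, every such p is a key, so possible[p] is getD p [])
  let res : PySem.Dict String (List String) :=
    possible.keys.foldl (fun d p =>
      if ¬ ((possible.getD p []).length == 0) then d.insert p (possible.getD p []) else d)
      PySem.Dict.empty
  res.items

-- ===== PORT B =====
-- hand-written bisect_left from Source B (while lo < hi: …); ages[mid] is in range whenever
-- lo < hi ≤ len ages, so the in-range read ages[mid] is ported as ages.getD mid 0
def pvBisect (ages : List Int) (target : Int) (lo hi : Nat) : Nat :=
  if h : lo < hi then
    let mid := (lo + hi) / 2
    if ages.getD mid 0 < target then pvBisect ages target (mid + 1) hi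
    else pvBisect ages target lo mid
  else lo
termination_by hi - lo
decreasing_by
  · have h1 : lo ≤ (lo + hi) / 2 := Nat.le_div_two_iff_mul_two_le.mpr (by omega)
    omega
  · have h2 : (lo + hi) / 2 < hi := Nat.div_lt_iff_lt_mul (by omega) |>.mpr (by omega)
    omega

-- the rightward scan from Source B (while j < len(ctrl) and ages[j] <= upper: append (i, name));
-- ages[j] is ctrl[j][0], and j is in range inside the loop, so reads are ported with getD
def pvScan (ctrl : List (Int × Int × String)) (upper : Int) (j : Nat) (acc : List (Int × String)) : List (Int × String) :=
  if h : j < ctrl.length then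
    if (ctrl.getD j (0, 0, "")).1 ≤ upper then
      pvScan ctrl upper (j + 1) (acc ++ [((ctrl.getD j (0, 0, "")).2.1, (ctrl.getD j (0, 0, "")).2.2)])
    else acc
  else acc
termination_by ctrl.length - j

def create_list_possible_matches_alt (patients : List (String × Int)) (controls : List (String × Int)) (agediff : Int) : List (String × List String) :=
  let pd := (PySem.Dict.ofList patients).items
  let cd := (PySem.Dict.ofList controls).items
  -- ctrl = sorted([(age, i, name) for i, (name, age) in enumerate(controls.items())], key=λt. t[0])
  let ctrl := PySem.List.sorted ((PySem.List.enumerate cd 0).map (fun e => (e.2.2, e.1, e.2.1))) (fun t => t.1)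
  let ages := ctrl.map (fun t => t.1)
  -- state = (result, cache); cache[p_age] is looked up with getD since the key is present
  let st : PySem.Dict String (List String) × PySem.Dict Int (List String) :=
    pd.foldl (fun s pp =>
      if s.2.contains pp.2 then
        ((if s.2.getD pp.2 [] ≠ [] then s.1.insert pp.1 (s.2.getD pp.2 []) else s.1), s.2)
      else
        let lo := pvBisect ages (pp.2 - agediff) 0 ctrl.length
        let ms := pvScan ctrl (pp.2 + agediff) lo []
        let names := (PySem.List.sorted ms (fun t => t.1)).map (fun t => t.2)
        ((if names ≠ [] then s.1.insert pp.1 names else s.1), s.2.insert pp.2 names))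
      (PySem.Dict.empty, PySem.Dict.empty)
  st.1.items

-- ===== PRECONDITION & SPEC =====
def Spec_create_list_possible_matches (patients : List (String × Int)) (controls : List (String × Int)) (agediff : Int) (out : List (String × List String)) : Prop := out = create_list_possible_matches_alt patients controls agediff
instance (patients : List (String × Int)) (controls : List (String × Int)) (agediff : Int) (out : List (String × List String)) : Decidable (Spec_create_list_possible_matches patients controls agediff out) := by unfold Spec_create_list_possible_matches; infer_instance

-- ===== CLAIM (what is proved, stated in full; the proofs are below) =====
def Claim_equal_create_list_possible_matches : Prop := ∀ (patients : List (String × Int)) (controls : List (String × Int)) (agediff : Int), Dom_create_list_possible_matches patients controls agediff → Spec_create_list_possible_matches patients controls agediff (create_list_possible_matches patients controls agediff)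

-- ===== LEMMAS AND PROOFS =====

-- the per-patient row both programs compute: matching control names in control order
def pvRow (cd : List (String × Int)) (agediff : Int) (pa : Int) : List String :=
  (cd.filter (fun cc => decide (|pa - cc.2| ≤ agediff))).map (fun cc => cc.1)

theorem pvA_inner_getD (cd : List (String × Int)) (agediff : Int) (pp : String × Int)
    (d : PySem.Dict String (List String)) (q : String) :
    ((cd.foldl (fun d cc =>
        if |pp.2 - cc.2| ≤ agediff then d.modify pp.1 [] (fun l => l ++ [cc.1]) else d) d).getD q [])
      = if q = pp.1 then d.getD q [] ++ pvRow cd agediff pp.2 else d.getD q [] := by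
  induction cd generalizing d with
  | nil => simp [pvRow]
  | cons cc cs ih =>
    simp only [List.foldl_cons]
    by_cases h : |pp.2 - cc.2| ≤ agediff
    · rw [if_pos h, ih]
      simp [pvRow, PySem.Dict.getD_modify, h]
      split <;> simp_all
    · rw [if_neg h, ih]
      simp [pvRow, h]

theorem pvA_outer_getD (cd : List (String × Int)) (agediff : Int) (ps : List (String × Int))
    (d : PySem.Dict String (List String)) (q : String) :
    ((ps.foldl (fun d pp => cd.foldl (fun d cc =>
        if |pp.2 - cc.2| ≤ agediff then d.modify pp.1 [] (fun l => l ++ [cc.1]) else d) d) d).getD q [])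
      = d.getD q [] ++ (ps.filter (fun pp => pp.1 == q)).flatMap (fun pp => pvRow cd agediff pp.2) := by
  induction ps generalizing d with
  | nil => simp
  | cons pp ps ih =>
    simp only [List.foldl_cons, List.filter_cons]
    rw [ih, pvA_inner_getD]
    by_cases h : q = pp.1
    · simp [h, List.flatMap_cons]
    · rw [if_neg h, if_neg (by simp [beq_iff_eq]; exact fun hh => h hh.symm)]

theorem pvA_inner_keys (cd : List (String × Int)) (agediff : Int) (pp : String × Int)
    (d : PySem.Dict String (List String)) (hk : pp.1 ∈ d.keys) :
    ((cd.foldl (fun d cc =>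
        if |pp.2 - cc.2| ≤ agediff then d.modify pp.1 [] (fun l => l ++ [cc.1]) else d) d).keys)
      = d.keys := by
  induction cd generalizing d with
  | nil => rfl
  | cons cc cs ih =>
    simp only [List.foldl_cons]
    by_cases h : |pp.2 - cc.2| ≤ agediff
    · rw [if_pos h, ih, PySem.Dict.keys_modify, PySem.Dict.keys_insert_of_contains]
      · exact (PySem.Dict.contains_iff_mem_keys _ _).mpr hk
      · rw [PySem.Dict.keys_modify, PySem.Dict.keys_insert_of_contains]
        · exact hk
        · exact (PySem.Dict.contains_iff_mem_keys _ _).mpr hk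
    · rw [if_neg h, ih _ hk]

theorem pvA_outer_keys (cd : List (String × Int)) (agediff : Int) (ps : List (String × Int))
    (d : PySem.Dict String (List String)) (hk : ∀ pp ∈ ps, pp.1 ∈ d.keys) :
    ((ps.foldl (fun d pp => cd.foldl (fun d cc =>
        if |pp.2 - cc.2| ≤ agediff then d.modify pp.1 [] (fun l => l ++ [cc.1]) else d) d) d).keys)
      = d.keys := by
  induction ps generalizing d with
  | nil => rfl
  | cons pp ps ih =>
    simp only [List.foldl_cons]
    rw [ih, pvA_inner_keys cd agediff pp d (hk pp (by simp))]
    intro qq hq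
    rw [pvA_inner_keys cd agediff pp d (hk pp (by simp))]
    exact hk qq (by simp [hq])

theorem pv_filter_eq_single (ps : List (String × Int)) (hn : (ps.map Prod.fst).Nodup)
    (pp : String × Int) (hm : pp ∈ ps) :
    ps.filter (fun x => x.1 == pp.1) = [pp] := by
  induction ps with
  | nil => simp at hm
  | cons a ps ih =>
    simp only [List.map_cons, List.nodup_cons] at hn
    rcases List.mem_cons.mp hm with h | h
    · subst h
      simp only [List.filter_cons, beq_self_eq_true, if_pos]
      have : ps.filter (fun x => x.1 == pp.1) = [] := by
        apply List.filter_eq_nil_iff.mpr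
        intro x hx
        simp only [beq_iff_eq]
        exact fun he => hn.1 (he ▸ List.mem_map_of_mem hx)
      simp [this]
    · have hne : a.1 ≠ pp.1 := by
        intro he
        exact hn.1 (he ▸ List.mem_map_of_mem h)
      simp only [List.filter_cons]
      rw [if_neg (by simp [beq_iff_eq]; exact fun he => hne he)]
      exact ih hn.2 h

theorem pv_items_foldl_insertIf {α ν : Type} (key : α → String) (cond : α → Prop) [DecidablePred cond]
    (val : α → ν) : ∀ (l : List α) (d : PySem.Dict String ν),
    (∀ a ∈ l, d.contains (key a) = false) → (l.map key).Nodup →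
    (l.foldl (fun d a => if cond a then d.insert (key a) (val a) else d) d).items
      = d.items ++ (l.filter (fun a => decide (cond a))).map (fun a => (key a, val a)) := by
  intro l
  induction l with
  | nil => simp
  | cons a l ih =>
    intro d hf hn
    simp only [List.map_cons, List.nodup_cons] at hn
    simp only [List.foldl_cons, List.filter_cons]
    by_cases h : cond a
    · rw [if_pos h, if_pos (by simpa using h)]
      rw [ih _ ?hf hn.2, PySem.Dict.items_insert_of_not_contains _ _ (hf a (by simp))]
      · simp
      case hf =>
        intro b hb
        rw [PySem.Dict.contains_insert]
        simp only [Bool.or_eq_false_iff]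
        refine ⟨?_, hf b (by simp [hb])⟩
        simp only [beq_eq_false_iff_ne, ne_eq]
        exact fun he => hn.1 (he ▸ List.mem_map_of_mem hb)
    · rw [if_neg h, if_neg (by simpa using h), ih _ (fun b hb => hf b (by simp [hb])) hn.2]

-- A's value, in canonical form
theorem pvA_canon (patients controls : List (String × Int)) (agediff : Int) :
    create_list_possible_matches patients controls agediff
      = (((PySem.Dict.ofList patients).items.filter
            (fun pp => ¬ ((pvRow (PySem.Dict.ofList controls).items agediff pp.2).length == 0))).map
          (fun pp => (pp.1, pvRow (PySem.Dict.ofList controls).items agediff pp.2))) := by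
  simp only [create_list_possible_matches]
  have hnp : ((PySem.Dict.ofList patients).items.map Prod.fst).Nodup := by
    have := PySem.Dict.nodup_keys_ofList patients
    simpa [PySem.Dict.keys] using this
  set pd := (PySem.Dict.ofList patients).items with hpd
  set cd := (PySem.Dict.ofList controls).items with hcd
  set possible0 := pd.foldl (fun d pp => d.insert pp.1 ([] : List String)) PySem.Dict.empty with hp0
  set possible1 := pd.foldl (fun d pp =>
      cd.foldl (fun d cc =>
        if |pp.2 - cc.2| ≤ agediff then d.modify pp.1 [] (fun l => l ++ [cc.1]) else d) d) possible0 with hp1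
  have h0 : possible0.items = pd.map (fun pp => (pp.1, ([] : List String))) := by
    rw [hp0, PySem.Dict.items_foldl_insert_fresh pd (fun pp => pp.1) (fun _ => ([] : List String))
      PySem.Dict.empty (fun a _ => PySem.Dict.contains_empty _) hnp]
    simp [PySem.Dict.empty]
  have hkeys0 : possible0.keys = pd.map Prod.fst := by
    simp [PySem.Dict.keys, h0]
  have hkeys1 : possible1.keys = pd.map Prod.fst := by
    rw [hp1, pvA_outer_keys _ _ _ _ (fun pp hpp => by rw [hkeys0]; exact List.mem_map_of_mem hpp),
      hkeys0]
  have hget : ∀ pp ∈ pd, possible1.getD pp.1 [] = pvRow cd agediff pp.2 := by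
    intro pp hpp
    rw [hp1, pvA_outer_getD]
    have h00 : possible0.getD pp.1 [] = [] := by
      refine PySem.Dict.getD_of_mem_items possible0 ?_ ?_ []
      · rw [h0]; exact List.mem_map_of_mem hpp
      · rw [hkeys0]; exact hnp
    rw [h00, pv_filter_eq_single pd hnp pp hpp]
    simp
  rw [pv_items_foldl_insertIf (fun p => p)
      (fun p => ¬ ((possible1.getD p []).length == 0)) (fun p => possible1.getD p [])
      possible1.keys PySem.Dict.empty (fun a _ => PySem.Dict.contains_empty _)
      (by simpa [hkeys1] using hnp)]
  simp only [show (PySem.Dict.empty : PySem.Dict String (List String)).items = [] from rfl, List.nil_append]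
  rw [hkeys1, List.filter_map]
  rw [List.map_map]
  have hfc : pd.filter ((fun p => decide ¬((possible1.getD p []).length == 0)) ∘ Prod.fst)
      = pd.filter (fun pp => decide ¬((pvRow cd agediff pp.2).length == 0)) := by
    apply List.filter_congr
    intro pp hpp
    simp only [Function.comp]
    rw [hget pp hpp]
  rw [hfc]
  apply List.map_congr_left
  intro pp hpp
  simp only [Function.comp]
  rw [hget pp (List.mem_of_mem_filter hpp)]

-- ---- B side ----


theorem pvBisect_spec (ages : List Int) (target : Int)
    (hmono : ∀ i j, i ≤ j → j < ages.length → ages.getD i 0 ≤ ages.getD j 0) :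
    ∀ (lo hi : Nat), hi ≤ ages.length → lo ≤ hi →
    (∀ j, j < lo → ages.getD j 0 < target) →
    (∀ j, hi ≤ j → j < ages.length → target ≤ ages.getD j 0) →
    pvBisect ages target lo hi ≤ ages.length ∧
    (∀ j, j < pvBisect ages target lo hi → ages.getD j 0 < target) ∧
    (∀ j, pvBisect ages target lo hi ≤ j → j < ages.length → target ≤ ages.getD j 0) := by
  intro lo hi
  induction lo, hi using pvBisect.induct ages target with
  | case1 lo hi h mid hlt ih =>
    intro hhi hlh hlow hhigh
    rw [pvBisect, dif_pos h, if_pos hlt]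
    refine ih ?_ ?_ ?_ ?_
    · exact hhi
    · have : mid < hi := Nat.div_lt_iff_lt_mul (by omega) |>.mpr (by omega)
      omega
    · intro j hj
      have hmidhi : mid < hi := Nat.div_lt_iff_lt_mul (by omega) |>.mpr (by omega)
      exact lt_of_le_of_lt (hmono j mid (by omega) (by omega)) hlt
    · exact hhigh
  | case2 lo hi h mid hge ih =>
    intro hhi hlh hlow hhigh
    rw [pvBisect, dif_pos h, if_neg hge]
    have hlomid : lo ≤ mid := Nat.le_div_two_iff_mul_two_le.mpr (by omega)
    have hmidhi : mid < hi := Nat.div_lt_iff_lt_mul (by omega) |>.mpr (by omega)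
    refine ih (by omega) hlomid hlow ?_
    intro j hj hjlen
    exact le_trans (not_lt.mp hge) (hmono mid j hj hjlen)
  | case3 lo hi h =>
    intro hhi hlh hlow hhigh
    rw [pvBisect, dif_neg h]
    exact ⟨by omega, hlow, fun j hj hjl => hhigh j (by omega) hjl⟩

theorem pvScan_eq (ctrl : List (Int × Int × String)) (upper : Int) : ∀ (j : Nat) (acc : List (Int × String)),
    pvScan ctrl upper j acc
      = acc ++ ((ctrl.drop j).takeWhile (fun t => decide (t.1 ≤ upper))).map (fun t => (t.2.1, t.2.2)) := by
  intro j acc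
  induction j, acc using pvScan.induct ctrl upper with
  | case1 j acc h hle ih =>
    rw [pvScan, dif_pos h, if_pos hle, ih, List.drop_eq_getElem_cons h]
    have hg : ctrl.getD j (0,0,"") = ctrl[j] := List.getD_eq_getElem ctrl _ h
    rw [hg] at hle ⊢
    rw [List.takeWhile_cons, if_pos (by simpa using hle)]
    simp
  | case2 j acc h hgt =>
    rw [pvScan, dif_pos h, if_neg hgt, List.drop_eq_getElem_cons h]
    have hg : ctrl.getD j (0,0,"") = ctrl[j] := List.getD_eq_getElem ctrl _ h
    rw [hg] at hgt
    rw [List.takeWhile_cons, if_neg (by simpa using hgt)]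
    simp
  | case3 j acc h =>
    rw [pvScan, dif_neg h]
    rw [List.drop_of_length_le (by omega)]
    simp

theorem pv_takeWhile_eq_filter (u : Int) (l : List (Int × Int × String))
    (hpw : l.Pairwise (fun a b => a.1 ≤ b.1)) :
    l.takeWhile (fun t => decide (t.1 ≤ u)) = l.filter (fun t => decide (t.1 ≤ u)) := by
  induction l with
  | nil => rfl
  | cons a l ih =>
    rw [List.pairwise_cons] at hpw
    by_cases h : a.1 ≤ u
    · rw [List.takeWhile_cons, List.filter_cons, if_pos (by simpa using h)]
      simp only [decide_eq_true h, ih hpw.2, if_true]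
    · rw [List.takeWhile_cons, List.filter_cons, if_neg (by simpa using h)]
      simp only [decide_eq_false h, Bool.false_eq_true, if_false]
      symm
      apply List.filter_eq_nil_iff.mpr
      intro b hb
      simp only [decide_eq_true_eq]
      exact fun hbu => h (le_trans (hpw.1 b hb) hbu)

theorem pv_window (ctrl : List (Int × Int × String)) (t u : Int) (lo : Nat)
    (hpw : ctrl.Pairwise (fun a b => a.1 ≤ b.1)) (hlo : lo ≤ ctrl.length)
    (hlow : ∀ j, j < lo → ((ctrl.map (fun t => t.1)).getD j 0) < t)
    (hhigh : ∀ j, lo ≤ j → j < ctrl.length → t ≤ ((ctrl.map (fun t => t.1)).getD j 0)) :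
    ((ctrl.drop lo).takeWhile (fun tr => decide (tr.1 ≤ u)))
      = ctrl.filter (fun tr => decide (t ≤ tr.1 ∧ tr.1 ≤ u)) := by
  have hlen : (ctrl.map (fun t => t.1)).length = ctrl.length := by simp
  have hget : ∀ j (hj : j < ctrl.length), (ctrl.map (fun t => t.1)).getD j 0 = (ctrl[j]).1 := by
    intro j hj
    rw [List.getD_eq_getElem _ _ (by simpa using hj)]
    simp
  -- split ctrl
  conv_rhs => rw [← List.take_append_drop lo ctrl, List.filter_append]
  have h1 : (ctrl.take lo).filter (fun tr => decide (t ≤ tr.1 ∧ tr.1 ≤ u)) = [] := by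
    apply List.filter_eq_nil_iff.mpr
    intro b hb
    rcases List.mem_iff_getElem.mp hb with ⟨k, hk, hbk⟩
    have hk' : k < lo := by
      have := hk; simp only [List.length_take] at this; omega
    have hkl : k < ctrl.length := by omega
    have hbv : b = ctrl[k] := by
      rw [← hbk]; simp [List.getElem_take]
    have : b.1 < t := by
      have h' := hlow k hk'
      rw [hget k hkl] at h'
      rw [hbv]
      exact h'
    simp only [decide_eq_true_eq]
    omega
  have h2 : (ctrl.drop lo).filter (fun tr => decide (t ≤ tr.1 ∧ tr.1 ≤ u))
      = (ctrl.drop lo).filter (fun tr => decide (tr.1 ≤ u)) := by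
    apply List.filter_congr
    intro b hb
    rcases List.mem_iff_getElem.mp hb with ⟨k, hk, hbk⟩
    have hkl : lo + k < ctrl.length := by simpa [Nat.lt_sub_iff_add_lt'] using hk
    have hbv : b = ctrl[lo + k] := by
      rw [← hbk]; simp [List.getElem_drop]
    have hbt : t ≤ b.1 := by
      have h' := hhigh (lo + k) (by omega) hkl
      rw [hget _ hkl] at h'
      rw [hbv]
      exact h'
    rw [decide_eq_decide]
    exact ⟨fun hh => hh.2, fun hh => ⟨hbt, hh⟩⟩
  rw [h1, List.nil_append, h2, pv_takeWhile_eq_filter u _ (hpw.sublist (List.drop_sublist lo ctrl))]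

theorem pv_enum_row (cd : List (String × Int)) (agediff pa : Int) : ∀ (s : Int),
    (((PySem.List.enumerate cd s).filter (fun e => decide (|pa - e.2.2| ≤ agediff))).map
        (fun e => e.2.1))
      = pvRow cd agediff pa := by
  induction cd with
  | nil => intro s; simp [pvRow, PySem.List.enumerate]
  | cons cc cs ih =>
    intro s
    rw [PySem.List.enumerate_cons, List.filter_cons]
    by_cases h : |pa - cc.2| ≤ agediff
    · simp only [decide_eq_true h, if_true, List.map_cons, ih (s+1)]
      simp [pvRow, h]
    · simp only [decide_eq_false h, Bool.false_eq_true, if_false, ih (s+1)]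
      simp [pvRow, h]

theorem pvB_names (cd : List (String × Int)) (agediff pa : Int) :
    ((PySem.List.sorted
        (pvScan (PySem.List.sorted ((PySem.List.enumerate cd 0).map (fun e => (e.2.2, e.1, e.2.1))) (fun t => t.1))
          (pa + agediff)
          (pvBisect ((PySem.List.sorted ((PySem.List.enumerate cd 0).map (fun e => (e.2.2, e.1, e.2.1))) (fun t => t.1)).map (fun t => t.1))
            (pa - agediff) 0
            (PySem.List.sorted ((PySem.List.enumerate cd 0).map (fun e => (e.2.2, e.1, e.2.1))) (fun t => t.1)).length)
          [])
        (fun t => t.1)).map (fun t => t.2))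
      = pvRow cd agediff pa := by
  set f : Int × String × Int → Int × Int × String := fun e => (e.2.2, e.1, e.2.1) with hf
  set triples := (PySem.List.enumerate cd 0).map f with htr
  set ctrl := PySem.List.sorted triples (fun t => t.1) with hctrl
  set ages := ctrl.map (fun t => t.1) with hages
  have hpw : ctrl.Pairwise (fun a b => a.1 ≤ b.1) := PySem.List.sorted_pairwise triples _
  have hperm : ctrl.Perm triples := PySem.List.sorted_perm triples _ false
  have hlen : ages.length = ctrl.length := by simp [hages]
  have hmono : ∀ i j, i ≤ j → j < ages.length → ages.getD i 0 ≤ ages.getD j 0 := by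
    intro i j hij hj
    rcases eq_or_lt_of_le hij with rfl | hlt
    · exact le_refl _
    · rw [List.getD_eq_getElem _ _ (by omega), List.getD_eq_getElem _ _ hj]
      have hjc : j < ctrl.length := by omega
      have hic : i < ctrl.length := by omega
      simp only [hages, List.getElem_map]
      exact List.pairwise_iff_getElem.mp hpw i j hic hjc hlt
  set t := pa - agediff with ht
  set u := pa + agediff with hu
  obtain ⟨hble, hblow, hbhigh⟩ := pvBisect_spec ages t hmono 0 ctrl.length (by omega) (by omega)
      (by omega) (by intro j h1 h2; omega)
  set lo := pvBisect ages t 0 ctrl.length with hlo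
  have hms : pvScan ctrl u lo []
      = ((ctrl.drop lo).takeWhile (fun tr => decide (tr.1 ≤ u))).map (fun tr => (tr.2.1, tr.2.2)) := by
    rw [pvScan_eq]; simp
  have hwin : ((ctrl.drop lo).takeWhile (fun tr => decide (tr.1 ≤ u)))
      = ctrl.filter (fun tr => decide (t ≤ tr.1 ∧ tr.1 ≤ u)) := by
    exact pv_window ctrl t u lo hpw (by omega) hblow (fun j h1 h2 => hbhigh j h1 (by omega))
  set P : Int × Int × String → Bool := fun tr => decide (t ≤ tr.1 ∧ tr.1 ≤ u) with hP
  set g : Int × Int × String → Int × String := fun tr => (tr.2.1, tr.2.2) with hg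
  set E := ((PySem.List.enumerate cd 0).filter (fun e => decide (|pa - e.2.2| ≤ agediff))).map
      (fun e => (e.1, e.2.1)) with hE
  have hEeq : E = ((triples.filter P).map g) := by
    rw [htr, List.filter_map, List.map_map, hE]
    have : (PySem.List.enumerate cd 0).filter (P ∘ f)
        = (PySem.List.enumerate cd 0).filter (fun e => decide (|pa - e.2.2| ≤ agediff)) := by
      apply List.filter_congr
      intro e _
      simp only [Function.comp, hP, hf]
      rw [decide_eq_decide]
      rw [ht, hu, abs_le]
      constructor <;> intro hh <;> omega
    rw [this]
    rfl
  have hpermE : E.Perm (pvScan ctrl u lo []) := by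
    rw [hms, hwin, hEeq]
    exact ((hperm.filter P).map g).symm
  have hpwE : E.Pairwise (fun a b => a.1 < b.1) := by
    rw [hE]
    refine List.Pairwise.map _ ?_ ((PySem.List.pairwise_lt_enumerate cd 0).filter _)
    intro a b h
    exact h
  rw [PySem.List.sorted_eq_of_perm_of_pairwise_lt _ E _ hpermE hpwE]
  rw [hE, List.map_map]
  exact pv_enum_row cd agediff pa 0

-- B's result fold with its per-age cache: the cache never changes a row (every cached
-- value is the recomputation), so the result collects exactly the nonempty rows
theorem pvB_fold (compute : Int → List String) :
    ∀ (ps : List (String × Int)) (d : PySem.Dict String (List String)) (cache : PySem.Dict Int (List String)),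
    (∀ pp ∈ ps, d.contains pp.1 = false) → (ps.map Prod.fst).Nodup →
    (∀ a v, cache.get? a = some v → v = compute a) →
    ((ps.foldl (fun s pp =>
        if s.2.contains pp.2 then
          ((if s.2.getD pp.2 [] ≠ [] then s.1.insert pp.1 (s.2.getD pp.2 []) else s.1), s.2)
        else
          ((if compute pp.2 ≠ [] then s.1.insert pp.1 (compute pp.2) else s.1),
            s.2.insert pp.2 (compute pp.2)))
      (d, cache)).1.items)
      = d.items ++ (ps.filter (fun pp => decide (compute pp.2 ≠ []))).map (fun pp => (pp.1, compute pp.2)) := by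
  intro ps
  induction ps with
  | nil => intro d cache _ _ _; simp
  | cons pp ps ih =>
    intro d cache hf hn hinv
    simp only [List.map_cons, List.nodup_cons] at hn
    simp only [List.foldl_cons]
    have hstep : ∀ (d' : PySem.Dict String (List String)) (cache' : PySem.Dict Int (List String)),
        d' = (if compute pp.2 ≠ [] then d.insert pp.1 (compute pp.2) else d) →
        (∀ a v, cache'.get? a = some v → v = compute a) →
        ((ps.foldl (fun s pp =>
            if s.2.contains pp.2 then
              ((if s.2.getD pp.2 [] ≠ [] then s.1.insert pp.1 (s.2.getD pp.2 []) else s.1), s.2)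
            else
              ((if compute pp.2 ≠ [] then s.1.insert pp.1 (compute pp.2) else s.1),
                s.2.insert pp.2 (compute pp.2)))
          (d', cache')).1.items)
          = d.items ++ ((pp :: ps).filter (fun pp => decide (compute pp.2 ≠ []))).map (fun pp => (pp.1, compute pp.2)) := by
      intro d' cache' hd' hinv'
      have hf' : ∀ qq ∈ ps, d'.contains qq.1 = false := by
        intro qq hq
        rw [hd']
        by_cases hcm : compute pp.2 ≠ []
        · rw [if_pos hcm, PySem.Dict.contains_insert]
          simp only [Bool.or_eq_false_iff]
          refine ⟨?_, hf qq (by simp [hq])⟩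
          simp only [beq_eq_false_iff_ne, ne_eq]
          exact fun he => hn.1 (he ▸ List.mem_map_of_mem hq)
        · rw [if_neg hcm]
          exact hf qq (by simp [hq])
      rw [ih d' cache' hf' hn.2 hinv', hd', List.filter_cons]
      by_cases hcm : compute pp.2 ≠ []
      · rw [if_pos hcm, if_pos (by simpa using hcm),
          PySem.Dict.items_insert_of_not_contains _ _ (hf pp (by simp))]
        simp
      · rw [if_neg hcm, if_neg (by simpa using hcm)]
    by_cases hc : cache.contains pp.2
    · rw [if_pos hc]
      obtain ⟨v, hv⟩ : ∃ v, cache.get? pp.2 = some v := by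
        rw [← Option.isSome_iff_exists, ← PySem.Dict.contains_eq_isSome_get?, hc]
      have hveq : v = compute pp.2 := hinv _ _ hv
      have hgd : cache.getD pp.2 [] = compute pp.2 := by
        rw [PySem.Dict.getD_of_get?_eq_some _ _ hv, hveq]
      simp only [hgd]
      exact hstep _ _ rfl hinv
    · rw [if_neg hc]
      refine hstep _ _ rfl ?_
      intro a v hav
      rw [PySem.Dict.get?_insert] at hav
      by_cases ha : a = pp.2
      · rw [if_pos ha] at hav
        rw [ha]
        injection hav with h
        exact h.symm
      · rw [if_neg ha] at hav
        exact hinv a v hav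

-- B's value, in the same canonical form
theorem pvB_canon (patients controls : List (String × Int)) (agediff : Int) :
    create_list_possible_matches_alt patients controls agediff
      = (((PySem.Dict.ofList patients).items.filter
            (fun pp => ¬ ((pvRow (PySem.Dict.ofList controls).items agediff pp.2).length == 0))).map
          (fun pp => (pp.1, pvRow (PySem.Dict.ofList controls).items agediff pp.2))) := by
  simp only [create_list_possible_matches_alt]
  have hnp : ((PySem.Dict.ofList patients).items.map Prod.fst).Nodup := by
    have := PySem.Dict.nodup_keys_ofList patients
    simpa [PySem.Dict.keys] using this
  set pd := (PySem.Dict.ofList patients).items with hpd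
  set cd := (PySem.Dict.ofList controls).items with hcd
  rw [pvB_fold
      (fun pa : Int =>
        (PySem.List.sorted
          (pvScan (PySem.List.sorted ((PySem.List.enumerate cd 0).map (fun e => (e.2.2, e.1, e.2.1))) (fun t => t.1))
            (pa + agediff)
            (pvBisect ((PySem.List.sorted ((PySem.List.enumerate cd 0).map (fun e => (e.2.2, e.1, e.2.1))) (fun t => t.1)).map (fun t => t.1))
              (pa - agediff) 0
              (PySem.List.sorted ((PySem.List.enumerate cd 0).map (fun e => (e.2.2, e.1, e.2.1))) (fun t => t.1)).length)
            [])
          (fun t => t.1)).map (fun t => t.2))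
      pd PySem.Dict.empty PySem.Dict.empty
      (fun a _ => PySem.Dict.contains_empty _) hnp
      (fun a v hav => by rw [PySem.Dict.get?_empty] at hav; exact absurd hav (by simp))]
  simp only [show (PySem.Dict.empty : PySem.Dict String (List String)).items = [] from rfl,
    List.nil_append]
  have hcond : ∀ pp ∈ pd,
      (decide ((fun pa : Int =>
        (PySem.List.sorted
          (pvScan (PySem.List.sorted ((PySem.List.enumerate cd 0).map (fun e => (e.2.2, e.1, e.2.1))) (fun t => t.1))
            (pa + agediff)
            (pvBisect ((PySem.List.sorted ((PySem.List.enumerate cd 0).map (fun e => (e.2.2, e.1, e.2.1))) (fun t => t.1)).map (fun t => t.1))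
              (pa - agediff) 0
              (PySem.List.sorted ((PySem.List.enumerate cd 0).map (fun e => (e.2.2, e.1, e.2.1))) (fun t => t.1)).length)
            [])
          (fun t => t.1)).map (fun t => t.2)) pp.2 ≠ []))
        = (decide ¬ ((pvRow cd agediff pp.2).length == 0)) := by
    intro pp _
    have hn := pvB_names cd agediff pp.2
    rw [decide_eq_decide]
    simp only []
    rw [hn]
    simp [List.length_eq_zero_iff]
  rw [List.filter_congr hcond]
  apply List.map_congr_left
  intro pp _
  rw [pvB_names cd agediff pp.2]

-- ===== VERDICT (by name: the statement is the Claim_ definition above) =====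
theorem create_list_possible_matches_spec : Claim_equal_create_list_possible_matches := by
  intro patients controls agediff _
  unfold Spec_create_list_possible_matches
  rw [pvA_canon, pvB_canon]
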